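-- pv_equiv track=rewrite | github.com/Germanadjemian/Tarea_Criptograf-a | Main.py | caracter_a_numero
-- ===== SOURCE A (Python) =====
-- def caracter_a_numero(caracter):
--     # Tabla que asigna un número a cada letra del alfabeto y a caracteres especiales
--     tabla = {
--         **{chr(i + ord('a')): i for i in range(14)},  # a-n (0-13)
--         "ñ": 14,
--         **{chr(i + ord('o')): i + 15 for i in range(12)},  # o-z (15-26)
--         " ": 27,  # El espacio se asigna al índice 27
--         "*": 28  # El asterisco se asigna al índice 28
--     }
--     # Devuelve el índice numérico correspondiente al carácter o -1 si el carácter no está en la tabla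
--     return tabla.get(caracter.lower(), -1)
-- ===== SOURCE B (Python) =====
-- def caracter_a_numero(caracter):
--     # Arithmetic range checks on the code point instead of building a dict.
--     c = caracter.lower()
--     if len(c) != 1:
--         return -1
--     o = ord(c)
--     if ord('a') <= o <= ord('n'):
--         return o - ord('a')
--     if ord('o') <= o <= ord('z'):
--         return o - ord('o') + 15
--     if c == 'ñ':
--         return 14
--     if c == ' ':
--         return 27
--     if c == '*':
--         return 28
--     return -1
-- ===== Notes on version B (the rewrite author's own statement) =====
-- stated objective: simpler
-- what changed: B drops A's 29-entry dict built from two range comprehensions and computes the index directly with arithmetic range checks on ord() of the lowered character (with explicit branches for 'ñ', ' ', '*', and a length guard for non-single-character strings).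
import Mathlib
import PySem

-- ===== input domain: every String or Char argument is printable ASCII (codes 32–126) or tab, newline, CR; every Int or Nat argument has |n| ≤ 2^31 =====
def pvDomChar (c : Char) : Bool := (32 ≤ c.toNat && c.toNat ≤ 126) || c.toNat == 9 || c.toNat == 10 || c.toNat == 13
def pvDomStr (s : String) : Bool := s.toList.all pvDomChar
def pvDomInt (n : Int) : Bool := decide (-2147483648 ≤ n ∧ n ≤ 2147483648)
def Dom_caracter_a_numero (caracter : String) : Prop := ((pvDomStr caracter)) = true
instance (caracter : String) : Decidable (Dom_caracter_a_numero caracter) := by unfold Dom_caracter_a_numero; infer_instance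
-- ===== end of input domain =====

-- B replaces A's dict (built from two range comprehensions) by arithmetic range checks
-- on the code point of the lowered character (simpler; no table is built).

-- ===== PORT A =====
-- A's table: {**{chr(i+ord('a')): i for i in range(14)}, "ñ": 14,
--             **{chr(i+ord('o')): i+15 for i in range(12)}, " ": 27, "*": 28}
def tabla_caracter_a_numero : PySem.Dict String Int :=
  let t0 : PySem.Dict String Int :=
    (PySem.List.pyRange 0 14 1).foldl
      (fun d i => d.insert (String.ofList [Char.ofNat (i + 97).toNat]) i) PySem.Dict.empty
  let t1 := t0.insert "ñ" 14
  let t2 :=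
    (PySem.List.pyRange 0 12 1).foldl
      (fun d i => d.insert (String.ofList [Char.ofNat (i + 111).toNat]) (i + 15)) t1
  (t2.insert " " 27).insert "*" 28

-- return tabla.get(caracter.lower(), -1)
def caracter_a_numero (caracter : String) : Int :=
  (tabla_caracter_a_numero.get? (PySem.Str.lower caracter)).getD (-1)

-- ===== PORT B =====
def caracter_a_numero_alt (caracter : String) : Int :=
  let c := PySem.Str.lower caracter
  match c.toList with
  | [ch] =>                            -- len(c) == 1; o = ord(c)
    let o : Int := ch.toNat
    if 97 ≤ o ∧ o ≤ 110 then o - 97            -- ord('a') <= o <= ord('n')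
    else if 111 ≤ o ∧ o ≤ 122 then o - 111 + 15 -- ord('o') <= o <= ord('z')
    else if ch = 'ñ' then 14
    else if ch = ' ' then 27
    else if ch = '*' then 28
    else -1
  | _ => -1                            -- len(c) != 1

-- ===== PRECONDITION & SPEC =====
def Spec_caracter_a_numero (caracter : String) (out : Int) : Prop := out = caracter_a_numero_alt caracter
instance (caracter : String) (out : Int) : Decidable (Spec_caracter_a_numero caracter out) := by unfold Spec_caracter_a_numero; infer_instance

-- ===== CLAIM (what is proved, stated in full; the proofs are below) =====
def Claim_equal_caracter_a_numero : Prop := ∀ (caracter : String), Dom_caracter_a_numero caracter → Spec_caracter_a_numero caracter (caracter_a_numero caracter)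

-- ===== LEMMAS AND PROOFS =====

-- A's table as a literal association list, in insertion order
theorem tabla_eq : tabla_caracter_a_numero = PySem.Dict.mk
    [("a",0),("b",1),("c",2),("d",3),("e",4),("f",5),("g",6),("h",7),("i",8),("j",9),
     ("k",10),("l",11),("m",12),("n",13),("ñ",14),("o",15),("p",16),("q",17),("r",18),
     ("s",19),("t",20),("u",21),("v",22),("w",23),("x",24),("y",25),("z",26),
     (" ",27),("*",28)] := by decide

theorem char_eq_iff_toNat (c ch : Char) : (ch = c) ↔ (ch.toNat = c.toNat) :=
  ⟨fun h => by rw [h], fun h => Char.ext (UInt32.toNat_inj.mp h)⟩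

theorem str_beq_ofList (k : String) (l : List Char) : (k == String.ofList l) = (k.toList == l) := by
  by_cases h : k.toList = l
  · have hk : k = String.ofList l := by rw [← h, String.ofList_toList]
    simp [hk]
  · have hne : k ≠ String.ofList l := fun e => h (by rw [e, String.toList_ofList])
    simp [hne, h]

theorem get?_nil (x : String) : (PySem.Dict.mk ([] : List (String × Int))).get? x = none :=
  (PySem.Dict.get?_eq_none_iff_contains _ x).mpr rfl

-- the heart: looking up a one-character (or other) key in A's table
-- equals B's arithmetic on the character code
set_option maxHeartbeats 1000000 in
theorem key_case (l : List Char) :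
    (tabla_caracter_a_numero.get? (String.ofList l)).getD (-1) =
    (match l with
     | [ch] =>
       let o : Int := ch.toNat
       if 97 ≤ o ∧ o ≤ 110 then o - 97
       else if 111 ≤ o ∧ o ≤ 122 then o - 111 + 15
       else if ch = 'ñ' then 14
       else if ch = ' ' then 27
       else if ch = '*' then 28
       else -1
     | _ => (-1 : Int)) := by
  rw [tabla_eq]
  match l with
  | [] => simp [PySem.Dict.get?_mk_cons, get?_nil]
  | ch1 :: ch2 :: t => simp [PySem.Dict.get?_mk_cons, str_beq_ofList, get?_nil]
  | [ch] =>
    simp [PySem.Dict.get?_mk_cons, str_beq_ofList, char_eq_iff_toNat, get?_nil]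
    generalize ch.toNat = n
    by_cases h : n ≤ 255
    · interval_cases n <;> decide
    · rw [if_neg (by omega), if_neg (by omega), if_neg (by omega), if_neg (by omega),
          if_neg (by omega), if_neg (by omega), if_neg (by omega), if_neg (by omega),
          if_neg (by omega), if_neg (by omega), if_neg (by omega), if_neg (by omega),
          if_neg (by omega), if_neg (by omega), if_neg (by omega), if_neg (by omega),
          if_neg (by omega), if_neg (by omega), if_neg (by omega), if_neg (by omega),
          if_neg (by omega), if_neg (by omega), if_neg (by omega), if_neg (by omega),
          if_neg (by omega), if_neg (by omega), if_neg (by omega), if_neg (by omega),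
          if_neg (by omega)]
      rw [if_neg (by omega), if_neg (by omega), if_neg (by omega), if_neg (by omega),
          if_neg (by omega)]
      rfl

theorem main_eq (s : String) : caracter_a_numero s = caracter_a_numero_alt s := by
  have h := key_case (PySem.Str.lower s).toList
  simp only [String.ofList_toList] at h
  simpa [caracter_a_numero, caracter_a_numero_alt] using h

-- ===== VERDICT (by name: the statement is the Claim_ definition above) =====
theorem caracter_a_numero_spec : Claim_equal_caracter_a_numero := by
  intro s _
  unfold Spec_caracter_a_numero
  exact main_eq s
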